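-- pv_equiv track=rewrite | github.com/yuichiro-s/wiktionary-extractor-go | python/wiktionary_extractor/languages/en_de.py | get_participles
-- ===== SOURCE A (Python) =====
-- PRESENT_PARTICIPLE = 'PRESP'
--
-- PAST_PARTICIPLE = 'PP'
--
-- def get_participles(conjugations):
--     pp = None
--     presp = None
--     for t, form in conjugations:
--         if t == [PAST_PARTICIPLE]:
--             pp = form
--         elif t == [PRESENT_PARTICIPLE]:
--             presp = form
--     if not pp or not presp:
--         assert False, ('participle not found', pp, presp)
--     return presp, pp
-- ===== SOURCE B (Python) =====
-- PRESENT_PARTICIPLE = 'PRESP'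
--
-- PAST_PARTICIPLE = 'PP'
--
-- def get_participles(conjugations):
--     # scan from the end: the first match from the back is the last match overall
--     pp = None
--     presp = None
--     for t, form in reversed(conjugations):
--         if pp is None and t == [PAST_PARTICIPLE]:
--             pp = form
--         elif presp is None and t == [PRESENT_PARTICIPLE]:
--             presp = form
--         if pp is not None and presp is not None:
--             break
--     if pp and presp:
--         return presp, pp
--     assert False, ('participle not found', pp, presp)
-- ===== Notes on version B (the rewrite author's own statement) =====
-- stated objective: alternative
-- what changed: B scans the list from the back with first-match-wins accumulators and stops as soon as both participles are found, instead of A's full forward pass where the last match overwrites.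
import Mathlib
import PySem

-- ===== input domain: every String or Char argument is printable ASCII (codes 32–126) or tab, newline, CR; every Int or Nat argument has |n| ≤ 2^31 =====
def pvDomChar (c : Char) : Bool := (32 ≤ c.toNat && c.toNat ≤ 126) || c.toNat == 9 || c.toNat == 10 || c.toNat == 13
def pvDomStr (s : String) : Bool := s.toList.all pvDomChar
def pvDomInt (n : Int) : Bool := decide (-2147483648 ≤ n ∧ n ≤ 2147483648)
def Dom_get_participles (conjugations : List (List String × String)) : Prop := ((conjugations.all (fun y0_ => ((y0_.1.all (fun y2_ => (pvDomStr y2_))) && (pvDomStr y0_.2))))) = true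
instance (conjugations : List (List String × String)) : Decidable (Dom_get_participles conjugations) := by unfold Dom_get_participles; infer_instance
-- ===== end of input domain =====

-- B scans the list from the back with first-match-wins accumulators and early exit; same result as A's
-- forward last-overwrite pass. Equivalence of the RETURN value is proved on Pre_ (where A's assert passes).

-- ===== PORT A =====
-- Python truthiness of an Optional[str]: None and '' are falsy
def pvTruthy (o : Option String) : Bool :=
  match o with
  | none => false
  | some s => s ≠ ""

def stepA (s : Option String × Option String) (x : List String × String) :
    Option String × Option String :=
  if x.1 == ["PP"] then (some x.2, s.2)
  else if x.1 == ["PRESP"] then (s.1, some x.2)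
  else s

def get_participles (conjugations : List (List String × String)) : String × String :=
  let s := conjugations.foldl stepA (none, none)
  -- Python: if not pp or not presp: assert False  (excluded by Pre_; junk value here)
  if !pvTruthy s.1 || !pvTruthy s.2 then ("", "")
  else (s.2.getD "", s.1.getD "")

-- ===== PORT B =====
-- reversed loop with `break` once both are found
def scanB (ys : List (List String × String)) (pp presp : Option String) :
    Option String × Option String :=
  match ys with
  | [] => (pp, presp)
  | (t, form) :: rest =>
    let pp' := if pp.isNone && t == ["PP"] then some form else pp
    let presp' := if !(pp.isNone && t == ["PP"]) && (presp.isNone && t == ["PRESP"]) then some form else presp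
    if pp'.isSome && presp'.isSome then (pp', presp')
    else scanB rest pp' presp'

def get_participles_alt (conjugations : List (List String × String)) : String × String :=
  let s := scanB conjugations.reverse none none
  if pvTruthy s.1 && pvTruthy s.2 then (s.2.getD "", s.1.getD "")
  else ("", "")  -- Python: assert False (excluded by Pre_)

-- ===== PRECONDITION & SPEC =====
-- Pre_ excludes exactly the inputs where A's assert fires (AssertionError): the last ['PP'] entry
-- and the last ['PRESP'] entry must both exist and carry a non-empty form.
def Pre_get_participles (conjugations : List (List String × String)) : Prop :=
  (((conjugations.reverse.find? (fun p => p.1 == ["PP"])).map Prod.snd).getD "" ≠ "") ∧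
  (((conjugations.reverse.find? (fun p => p.1 == ["PRESP"])).map Prod.snd).getD "" ≠ "")
instance (conjugations : List (List String × String)) : Decidable (Pre_get_participles conjugations) := by unfold Pre_get_participles; infer_instance
def pvWitness_get_participles : (List (List String × String)) :=
  [(["PP"], "gone"), (["PRESP"], "going")]

def Spec_get_participles (conjugations : List (List String × String)) (out : String × String) : Prop := out = get_participles_alt conjugations
instance (conjugations : List (List String × String)) (out : String × String) : Decidable (Spec_get_participles conjugations out) := by unfold Spec_get_participles; infer_instance

-- ===== CLAIM (what is proved, stated in full; the proofs are below) =====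
def Claim_equal_get_participles : Prop := ∀ (conjugations : List (List String × String)), Dom_get_participles conjugations → Pre_get_participles conjugations → Spec_get_participles conjugations (get_participles conjugations)

-- ===== LEMMAS AND PROOFS =====

theorem foldlA_eq (xs : List (List String × String)) (s : Option String × Option String) :
    List.foldl stepA s xs =
      (((xs.reverse.find? (fun p => p.1 == ["PP"])).map Prod.snd).or s.1,
       ((xs.reverse.find? (fun p => p.1 == ["PRESP"])).map Prod.snd).or s.2) := by
  induction xs generalizing s with
  | nil => simp
  | cons x xs ih =>
    simp only [List.foldl_cons, ih, List.reverse_cons, List.find?_append]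
    by_cases h1 : x.1 = ["PP"]
    · simp [stepA, h1]
    · by_cases h2 : x.1 = ["PRESP"]
      · simp [stepA, h2]
      · simp [stepA, h1, h2]

theorem scanB_eq (ys : List (List String × String)) (pp presp : Option String) :
    scanB ys pp presp =
      (pp.or ((ys.find? (fun p => p.1 == ["PP"])).map Prod.snd),
       presp.or ((ys.find? (fun p => p.1 == ["PRESP"])).map Prod.snd)) := by
  induction ys generalizing pp presp with
  | nil => simp [scanB]
  | cons y ys ih =>
    obtain ⟨t, form⟩ := y
    simp only [scanB, ih]
    by_cases h1 : t = ["PP"] <;> by_cases h2 : t = ["PRESP"] <;>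
      cases pp <;> cases presp <;>
      simp_all

theorem states_eq (c : List (List String × String)) :
    List.foldl stepA (none, none) c = scanB c.reverse none none := by
  rw [foldlA_eq, scanB_eq]
  simp

-- ===== VERDICT (by name: the statement is the Claim_ definition above) =====
theorem get_participles_spec : Claim_equal_get_participles := by
  intro c _ _
  show get_participles c = get_participles_alt c
  unfold get_participles get_participles_alt
  rw [states_eq]
  cases h1 : pvTruthy (scanB c.reverse none none).1 <;>
    cases h2 : pvTruthy (scanB c.reverse none none).2 <;> simp [h1, h2]
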